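-- pv_equiv track=rewrite | github.com/jh05013/BOJ_algorithms | Coprime.py | coprimes
-- ===== SOURCE A (Python) =====
-- from itertools import combinations
--
-- def coprimes(n, k, factor):
--     # coprime to n, up to k
--     tot = k
--     for i in range(1, len(factor)+1):
--         for C in combinations(factor, i):
--             prod = 1
--             for p in C: prod*= p
--             tot+= (-1)**i * (k//prod)
--     return tot
-- ===== SOURCE B (Python) =====
-- def coprimes(n, k, factor):
--     # coprime to n, up to k
--     pairs = [(1, 1)]
--     for p in factor:
--         pairs += [(prod * p, -sign) for prod, sign in pairs]
--     return sum(sign * (k // prod) for prod, sign in pairs)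
-- ===== Notes on version B (the rewrite author's own statement) =====
-- stated objective: alternative
-- what changed: Replaces the size-indexed itertools.combinations enumeration (re-multiplying each subset from scratch) with an incrementally built table of (product, sign) pairs, doubling the table once per factor, then one pass summing sign*(k//product).
import Mathlib
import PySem

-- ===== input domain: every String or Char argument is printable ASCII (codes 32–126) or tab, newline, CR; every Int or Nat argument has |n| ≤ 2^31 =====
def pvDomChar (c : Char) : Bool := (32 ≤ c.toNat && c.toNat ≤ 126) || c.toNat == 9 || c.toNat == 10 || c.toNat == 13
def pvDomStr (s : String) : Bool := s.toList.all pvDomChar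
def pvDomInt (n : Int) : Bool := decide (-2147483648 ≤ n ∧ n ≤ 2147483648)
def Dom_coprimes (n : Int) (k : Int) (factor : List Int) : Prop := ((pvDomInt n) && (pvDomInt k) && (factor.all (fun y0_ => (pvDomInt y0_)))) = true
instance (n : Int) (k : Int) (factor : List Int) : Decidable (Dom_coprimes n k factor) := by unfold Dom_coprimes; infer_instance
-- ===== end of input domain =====

-- B replaces the size-indexed combinations enumeration with an incrementally built
-- (product, sign) table; alternative decomposition, same exact result.

-- ===== PORT A =====
-- helper: itertools.combinations(xs, i), in itertools order (lexicographic by index)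
def pvCombos (i : Nat) (xs : List Int) : List (List Int) :=
  match i, xs with
  | 0, _ => [[]]
  | _ + 1, [] => []
  | i + 1, x :: rest => (pvCombos i rest).map (fun C => x :: C) ++ pvCombos (i + 1) rest

-- helper: 'prod = 1; for p in C: prod *= p'
def pvProd (C : List Int) : Int := C.foldl (fun pr p => pr * p) 1

def coprimes (n : Int) (k : Int) (factor : List Int) : Int :=
  (PySem.List.pyRange 1 (↑factor.length + 1) 1).foldl
    (fun tot i =>
      (pvCombos i.toNat factor).foldl
        (fun tot C => tot + (-1 : Int) ^ i.toNat * PySem.Int.floordiv k (pvProd C)) tot)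
    k

-- ===== PORT B =====
def coprimes_alt (n : Int) (k : Int) (factor : List Int) : Int :=
  let pairs := factor.foldl
    (fun pairs p => pairs ++ pairs.map (fun q => (q.1 * p, -q.2)))
    [((1 : Int), (1 : Int))]
  pairs.foldl (fun t q => t + q.2 * PySem.Int.floordiv k q.1) 0

-- ===== PRECONDITION & SPEC =====
-- Pre_ excludes factor lists containing 0: there Python A raises ZeroDivisionError (k // 0), and B raises too.
def Pre_coprimes (n : Int) (k : Int) (factor : List Int) : Prop := (0 : Int) ∉ factor
instance (n : Int) (k : Int) (factor : List Int) : Decidable (Pre_coprimes n k factor) := by unfold Pre_coprimes; infer_instance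
def pvWitness_coprimes : Int × Int × List Int := (30, 20, [2, 3, 5])

def Spec_coprimes (n : Int) (k : Int) (factor : List Int) (out : Int) : Prop := out = coprimes_alt n k factor
instance (n : Int) (k : Int) (factor : List Int) (out : Int) : Decidable (Spec_coprimes n k factor out) := by unfold Spec_coprimes; infer_instance

-- ===== CLAIM (what is proved, stated in full; the proofs are below) =====
def Claim_equal_coprimes : Prop := ∀ (n : Int) (k : Int) (factor : List Int), Dom_coprimes n k factor → Pre_coprimes n k factor → Spec_coprimes n k factor (coprimes n k factor)

-- ===== LEMMAS AND PROOFS =====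

-- canonical recursive form of the inclusion-exclusion sum, parametrized by
-- accumulated product pr and sign s
def pvT (k pr s : Int) : List Int → Int
  | [] => s * PySem.Int.floordiv k pr
  | x :: xs => pvT k pr s xs + pvT k (pr * x) (-s) xs

-- A's sum over sizes 0..|xs| of sums over combinations, parametrized like pvT
def pvG (k pr s : Int) (xs : List Int) : Int :=
  ((List.range (xs.length + 1)).map
    (fun i => ((pvCombos i xs).map
      (fun C => s * (-1 : Int) ^ i * PySem.Int.floordiv k (pr * pvProd C))).sum)).sum

theorem pvCombos_gt (i : Nat) (xs : List Int) (h : xs.length < i) : pvCombos i xs = [] := by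
  induction xs generalizing i with
  | nil => cases i with | zero => omega | succ j => rfl
  | cons x rest ih =>
    cases i with
    | zero => omega
    | succ j =>
      simp only [pvCombos, ih j (by simp at h; omega), ih (j+1) (by simp at h ⊢; omega)]
      simp

theorem foldl_mul_eq (a : Int) (C : List Int) :
    C.foldl (fun pr p => pr * p) a = a * C.foldl (fun pr p => pr * p) 1 := by
  induction C generalizing a with
  | nil => simp
  | cons c l ih => simp only [List.foldl_cons]; rw [ih (a * c), ih (1 * c)]; ring

theorem pvProd_cons (x : Int) (C : List Int) : pvProd (x :: C) = x * pvProd C := by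
  simp only [pvProd, List.foldl_cons, one_mul]
  exact foldl_mul_eq x C

theorem sum_shift (H : Nat → Int) (m : Nat) (h0 : H (m + 1) = 0) :
    H 0 + ((List.range (m + 1)).map (fun j => H (j + 1))).sum = ((List.range (m + 1)).map H).sum := by
  have e1 : ((List.range (m + 2)).map H).sum
      = H 0 + ((List.range (m + 1)).map (fun j => H (j + 1))).sum := by
    rw [List.range_succ_eq_map]
    simp [List.map_map, Function.comp_def]
  have e2 : ((List.range (m + 2)).map H).sum = ((List.range (m + 1)).map H).sum + H (m + 1) := by
    rw [show m + 2 = (m + 1) + 1 from rfl, List.range_succ]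
    simp
  omega

theorem range_succ_map_sum (F : Nat → Int) (m : Nat) :
    ((List.range (m + 1)).map F).sum = F 0 + ((List.range m).map (fun j => F (j + 1))).sum := by
  rw [List.range_succ_eq_map]
  simp [List.map_map, Function.comp_def]

theorem pvG_cons (k pr s x : Int) (l : List Int) :
    pvG k pr s (x :: l) = pvG k pr s l + pvG k (pr * x) (-s) l := by
  have hcons : ∀ j : Nat,
      ((pvCombos (j + 1) (x :: l)).map
        (fun C => s * (-1 : Int) ^ (j + 1) * PySem.Int.floordiv k (pr * pvProd C))).sum
      = ((pvCombos j l).map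
          (fun C => (-s) * (-1 : Int) ^ j * PySem.Int.floordiv k ((pr * x) * pvProd C))).sum
        + ((pvCombos (j + 1) l).map
          (fun C => s * (-1 : Int) ^ (j + 1) * PySem.Int.floordiv k (pr * pvProd C))).sum := by
    intro j
    simp only [pvCombos, List.map_append, List.sum_append, List.map_map]
    congr 1
    apply congrArg List.sum
    apply List.map_congr_left
    intro C _
    simp only [Function.comp_apply]
    rw [pvProd_cons, ← mul_assoc pr x, pow_succ]
    ring
  unfold pvG
  simp only [List.length_cons]
  rw [range_succ_map_sum]
  rw [List.map_congr_left (fun j _ => hcons j)]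
  have esplit := PySem.List.sum_map_add_int (List.range (l.length + 1))
    (fun j => ((pvCombos j l).map
        (fun C => (-s) * (-1 : Int) ^ j * PySem.Int.floordiv k ((pr * x) * pvProd C))).sum)
    (fun j => ((pvCombos (j + 1) l).map
        (fun C => s * (-1 : Int) ^ (j + 1) * PySem.Int.floordiv k (pr * pvProd C))).sum)
  have hshift := sum_shift
    (fun i => ((pvCombos i l).map
      (fun C => s * (-1 : Int) ^ i * PySem.Int.floordiv k (pr * pvProd C))).sum)
    l.length
    (by simp [pvCombos_gt (l.length + 1) l (by omega)])
  simp only [pvCombos, pvProd, pow_zero, mul_one, List.map_cons, List.map_nil,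
    List.sum_cons, List.sum_nil, List.foldl_nil] at *
  omega

theorem pvG_eq_pvT (k pr s : Int) (xs : List Int) : pvG k pr s xs = pvT k pr s xs := by
  induction xs generalizing pr s with
  | nil =>
    simp [pvG, pvT, pvCombos, pvProd, List.range_succ]
  | cons x l ih =>
    rw [pvG_cons, pvT, ih pr s, ih (pr * x) (-s)]

theorem alt_invariant (k : Int) (xs : List Int) (P : List (Int × Int)) :
    ((xs.foldl (fun pairs p => pairs ++ pairs.map (fun q => (q.1 * p, -q.2))) P).map
      (fun q => q.2 * PySem.Int.floordiv k q.1)).sum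
    = (P.map (fun q => pvT k q.1 q.2 xs)).sum := by
  induction xs generalizing P with
  | nil => simp [pvT]
  | cons x l ih =>
    rw [List.foldl_cons, ih]
    simp only [List.map_append, List.sum_append, List.map_map]
    have := PySem.List.sum_map_add_int P
      (fun q => pvT k q.1 q.2 l) (fun q => pvT k (q.1 * x) (-q.2) l)
    simp only [pvT, Function.comp_def]
    omega

theorem floordiv_one (k : Int) : PySem.Int.floordiv k 1 = k := by
  rw [PySem.Int.floordiv_eq_ediv_of_pos (show (0 : Int) < 1 by omega)]
  exact Int.ediv_one k

theorem coprimes_eq_pvG (n k : Int) (factor : List Int) : coprimes n k factor = pvG k 1 1 factor := by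
  unfold coprimes
  rw [PySem.List.pyRange_one 1 (↑factor.length + 1)]
  have hn : ((↑factor.length + 1 - 1 : Int)).toNat = factor.length := by omega
  rw [hn, List.foldl_map]
  have hfun : (fun (tot : Int) (kk : Nat) =>
      (pvCombos ((1 : Int) + ↑kk).toNat factor).foldl
        (fun tot C => tot + (-1 : Int) ^ ((1 : Int) + ↑kk).toNat * PySem.Int.floordiv k (pvProd C)) tot)
      = (fun (tot : Int) (kk : Nat) => tot +
        ((pvCombos (kk + 1) factor).map
          (fun C => (-1 : Int) ^ (kk + 1) * PySem.Int.floordiv k (pvProd C))).sum) := by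
    funext tot kk
    have ht : ((1 : Int) + ↑kk).toNat = kk + 1 := by omega
    rw [ht, PySem.List.foldl_add]
  rw [hfun, PySem.List.foldl_add]
  unfold pvG
  rw [range_succ_map_sum]
  simp only [one_mul, pow_zero, pvCombos, pvProd, List.map_cons, List.map_nil, List.sum_cons,
    List.sum_nil, List.foldl_nil, floordiv_one]
  omega

theorem coprimes_alt_eq_pvT (n k : Int) (factor : List Int) : coprimes_alt n k factor = pvT k 1 1 factor := by
  show (List.foldl (fun t q => t + q.2 * PySem.Int.floordiv k q.1) 0
      (factor.foldl (fun pairs p => pairs ++ pairs.map (fun q => (q.1 * p, -q.2)))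
        [((1 : Int), (1 : Int))])) = pvT k 1 1 factor
  rw [PySem.List.foldl_add]
  rw [alt_invariant]
  simp

-- ===== VERDICT (by name: the statement is the Claim_ definition above) =====
theorem coprimes_spec : Claim_equal_coprimes := by
  intro n k factor _ _
  unfold Spec_coprimes
  rw [coprimes_eq_pvG, coprimes_alt_eq_pvT, pvG_eq_pvT]
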